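-- pv_equiv track=rewrite | github.com/Bogdan1232-ad/podgotovka | justlessons/130325/ex23-11240.py | f
-- ===== SOURCE A (Python) =====
-- def f(x, y, A):
--     if x == y:
--         return 1
--     if x > y:
--         return 0
--     if A != 1:
--         return f(x + 2, y, 0) + f(x ** 2, y, 1) + f(x * 3, y, 0)
--     return  f(x + 2, y, 0) + f(x * 3, y, 0)
-- ===== SOURCE B (Python) =====
-- def f(x, y, A):
--     # Memoized on the (x, square-allowed) state: each state is computed once,
--     # instead of A's exponential re-exploration of the same states.
--     memo = {}
--
--     def go(x, sq):
--         if x == y: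
--             return 1
--         if x > y:
--             return 0
--         key = (x, sq)
--         if key not in memo:
--             r = go(x + 2, True) + go(x * 3, True)
--             if sq:
--                 r += go(x * x, False)
--             memo[key] = r
--         return memo[key]
--
--     return go(x, A != 1)
-- ===== Notes on version B (the rewrite author's own statement) =====
-- stated objective: faster
-- what changed: replaces A's plain exponential triple-branching recursion by the same recursion memoized on the (x, square-allowed) state, so each state is evaluated once
import Mathlib
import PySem

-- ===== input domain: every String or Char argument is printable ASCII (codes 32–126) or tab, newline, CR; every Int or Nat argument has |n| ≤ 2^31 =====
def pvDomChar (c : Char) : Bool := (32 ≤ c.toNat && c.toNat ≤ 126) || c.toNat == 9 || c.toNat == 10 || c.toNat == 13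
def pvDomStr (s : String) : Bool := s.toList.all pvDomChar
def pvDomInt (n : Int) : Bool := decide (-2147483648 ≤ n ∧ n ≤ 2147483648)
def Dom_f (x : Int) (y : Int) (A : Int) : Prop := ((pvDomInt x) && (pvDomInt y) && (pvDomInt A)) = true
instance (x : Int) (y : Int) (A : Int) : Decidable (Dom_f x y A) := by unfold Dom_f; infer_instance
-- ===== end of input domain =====

-- B memoizes A's recursion on the (x, square-allowed) state, evaluating each state once
-- instead of exponentially often; return values agree on every input where A terminates.

-- ===== PORT A =====
-- A's unbounded recursion terminates exactly on Pre_f (below); the fuel argument only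
-- makes it total in Lean and is chosen large enough (see fA_fuel_irrelevant below).
def fA (fuel : Nat) (x : Int) (y : Int) (A : Int) : Int :=
  match fuel with
  | 0 => 0
  | fuel + 1 =>
    if x = y then 1
    else if x > y then 0
    else if A ≠ 1 then fA fuel (x + 2) y 0 + fA fuel (x ^ 2) y 1 + fA fuel (x * 3) y 0
    else fA fuel (x + 2) y 0 + fA fuel (x * 3) y 0

def f (x : Int) (y : Int) (A : Int) : Int := fA (2 * (y - x).toNat + 2) x y A

-- ===== PORT B =====
-- go from Source B: memo maps (x, sq) to the computed count; fuel is a totality guard only.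
def goB (fuel : Nat) (y : Int) (x : Int) (sq : Bool) (memo : PySem.Dict (Int × Bool) Int) :
    Int × PySem.Dict (Int × Bool) Int :=
  match fuel with
  | 0 => (0, memo)
  | fuel + 1 =>
    if x = y then (1, memo)
    else if x > y then (0, memo)
    else
      match memo.get? (x, sq) with
      | some v => (v, memo)
      | none =>
        let p1 := goB fuel y (x + 2) true memo
        let p2 := goB fuel y (x * 3) true p1.2
        if sq then
          let p3 := goB fuel y (x * x) false p2.2
          let r := p1.1 + p2.1 + p3.1
          (r, p3.2.insert (x, sq) r)
        else
          let r := p1.1 + p2.1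
          (r, p2.2.insert (x, sq) r)

def f_alt (x : Int) (y : Int) (A : Int) : Int :=
  (goB (2 * (y - x).toNat + 2) y x (A != 1) PySem.Dict.empty).1

-- ===== PRECONDITION & SPEC =====
-- Pre_f excludes exactly the inputs (x ≤ 0 and x < y) on which A recurses forever and
-- raises RecursionError (B's identical state recursion raises there too).
def Pre_f (x : Int) (y : Int) (A : Int) : Prop := y ≤ x ∨ 1 ≤ x
instance (x : Int) (y : Int) (A : Int) : Decidable (Pre_f x y A) := by unfold Pre_f; infer_instance

def pvWitness_f : Int × Int × Int := (1, 12, 0)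

def Spec_f (x : Int) (y : Int) (A : Int) (out : Int) : Prop := out = f_alt x y A
instance (x : Int) (y : Int) (A : Int) (out : Int) : Decidable (Spec_f x y A out) := by unfold Spec_f; infer_instance

-- ===== CLAIM (what is proved, stated in full; the proofs are below) =====
def Claim_equal_f : Prop := ∀ (x : Int) (y : Int) (A : Int), Dom_f x y A → Pre_f x y A → Spec_f x y A (f x y A)

-- ===== LEMMAS AND PROOFS =====

-- the measure that bounds the recursion depth on Pre_f
def muF (y : Int) (x : Int) (sq : Bool) : Nat := 2 * (y - x).toNat + (if sq then 1 else 0)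

-- the stable value of A's recursion at state (x, sq), with canonical flag 0/1 and ample fuel
def valF (y : Int) (x : Int) (sq : Bool) : Int :=
  fA (2 * (y - x).toNat + 2) x y (cond sq 0 1)

def InvF (y : Int) (memo : PySem.Dict (Int × Bool) Int) : Prop :=
  ∀ x sq v, memo.get? (x, sq) = some v → v = valF y x sq

lemma fA_succ_def (fuel : Nat) (x y A : Int) :
    fA (fuel + 1) x y A =
      if x = y then 1
      else if x > y then 0
      else if A ≠ 1 then fA fuel (x + 2) y 0 + fA fuel (x ^ 2) y 1 + fA fuel (x * 3) y 0
      else fA fuel (x + 2) y 0 + fA fuel (x * 3) y 0 := rfl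

lemma goB_succ_def (fuel : Nat) (y x : Int) (sq : Bool) (memo : PySem.Dict (Int × Bool) Int) :
    goB (fuel + 1) y x sq memo =
      if x = y then (1, memo)
      else if x > y then (0, memo)
      else
        match memo.get? (x, sq) with
        | some v => (v, memo)
        | none =>
          let p1 := goB fuel y (x + 2) true memo
          let p2 := goB fuel y (x * 3) true p1.2
          if sq then
            let p3 := goB fuel y (x * x) false p2.2
            let r := p1.1 + p2.1 + p3.1
            (r, p3.2.insert (x, sq) r)
          else
            let r := p1.1 + p2.1
            (r, p2.2.insert (x, sq) r) := rfl

-- fA depends on its flag argument only through (A ≠ 1)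
lemma fA_congr (fuel : Nat) (x y A A' : Int) (h : A = 1 ↔ A' = 1) :
    fA fuel x y A = fA fuel x y A' := by
  cases fuel with
  | zero => rfl
  | succ k =>
    rw [fA_succ_def, fA_succ_def]
    by_cases h1 : x = y
    · simp [h1]
    · by_cases h2 : x > y
      · simp [h1, h2]
      · simp only [h1, h2, if_false, if_neg h1]
        rw [if_congr (not_congr h) rfl rfl]

lemma x_le_sq {x : Int} (hx : 1 ≤ x) : x ≤ x * x := by
  nlinarith

lemma mu_add2 {y x : Int} (hx : 1 ≤ x) (hxy : x < y) (b sq : Bool) :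
    muF y (x + 2) b < muF y x sq := by
  unfold muF; rcases b <;> rcases sq <;> simp <;> omega

lemma mu_mul3 {y x : Int} (hx : 1 ≤ x) (hxy : x < y) (b sq : Bool) :
    muF y (x * 3) b < muF y x sq := by
  unfold muF; rcases b <;> rcases sq <;> simp <;> omega

lemma mu_sq {y x : Int} (hx : 1 ≤ x) (hxy : x < y) :
    muF y (x * x) false < muF y x true := by
  have h := x_le_sq hx
  unfold muF; simp; omega

-- enough fuel: one more unit of fuel does not change fA's value on Pre_f
lemma fA_eq_one {x y A : Int} (fuel : Nat) (h : 0 < fuel) (hxy : x = y) : fA fuel x y A = 1 := by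
  cases fuel with
  | zero => omega
  | succ k => rw [fA_succ_def]; simp [hxy]

lemma fA_eq_zero {x y A : Int} (fuel : Nat) (h : 0 < fuel) (h1 : ¬ x = y) (h2 : x > y) :
    fA fuel x y A = 0 := by
  cases fuel with
  | zero => omega
  | succ k => rw [fA_succ_def]; simp [h1, h2]

lemma fA_stab (fuel : Nat) : ∀ (x A : Int), (y ≤ x ∨ 1 ≤ x) →
    muF y x (A != 1) < fuel → fA (fuel + 1) x y A = fA fuel x y A := by
  induction fuel with
  | zero => intro x A _ h; exact absurd h (Nat.not_lt_zero _)
  | succ k ih =>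
    intro x A hpre h
    by_cases h1 : x = y
    · rw [fA_eq_one _ (by omega) h1, fA_eq_one _ (by omega) h1]
    · by_cases h2 : x > y
      · rw [fA_eq_zero _ (by omega) h1 h2, fA_eq_zero _ (by omega) h1 h2]
      · have hxy : x < y := by omega
        have hx : 1 ≤ x := by rcases hpre with h' | h' <;> omega
        have hx2 : (1:Int) ≤ x + 2 := by omega
        have hx3 : (1:Int) ≤ x * 3 := by omega
        rw [fA_succ_def (k + 1) x y A, fA_succ_def k x y A]
        have e1 : fA (k + 1) (x + 2) y 0 = fA k (x + 2) y 0 := by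
          refine ih (x + 2) 0 (Or.inr hx2) ?_
          have := mu_add2 hx hxy (((0:Int)) != 1) (A != 1); omega
        have e3 : fA (k + 1) (x * 3) y 0 = fA k (x * 3) y 0 := by
          refine ih (x * 3) 0 (Or.inr hx3) ?_
          have := mu_mul3 hx hxy (((0:Int)) != 1) (A != 1); omega
        by_cases hA : A ≠ 1
        · have hAb : (A != 1) = true := by simpa using hA
          have e2 : fA (k + 1) (x ^ 2) y 1 = fA k (x ^ 2) y 1 := by
            refine ih (x ^ 2) 1 (Or.inr (by nlinarith)) ?_
            have h' := mu_sq hx hxy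
            have hx2' : x ^ 2 = x * x := by ring
            rw [hx2', show (((1:Int)) != 1) = false from by decide]
            rw [hAb] at h
            unfold muF at h h' ⊢
            simp at h h' ⊢
            omega
          simp only [if_neg h1, if_neg h2, if_pos hA, e1, e2, e3]
        · simp only [if_neg h1, if_neg h2, if_neg hA, e1, e3]

lemma fA_add (d : Nat) : ∀ (fuel : Nat) (x A : Int), (y ≤ x ∨ 1 ≤ x) →
    muF y x (A != 1) < fuel → fA (fuel + d) x y A = fA fuel x y A := by
  induction d with
  | zero => intro fuel x A _ _; rfl
  | succ k ih =>
    intro fuel x A hpre h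
    have : fuel + (k + 1) = (fuel + k) + 1 := by omega
    rw [this, fA_stab (y := y) (fuel + k) x A hpre (by omega), ih fuel x A hpre h]

lemma fA_fuel_irrelevant {y : Int} (f1 f2 : Nat) (x A : Int) (hpre : y ≤ x ∨ 1 ≤ x)
    (h1 : muF y x (A != 1) < f1) (h2 : muF y x (A != 1) < f2) :
    fA f1 x y A = fA f2 x y A := by
  rcases Nat.le_total f1 f2 with h | h
  · obtain ⟨d, rfl⟩ := Nat.exists_eq_add_of_le h
    exact (fA_add (y := y) d f1 x A hpre h1).symm
  · obtain ⟨d, rfl⟩ := Nat.exists_eq_add_of_le h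
    exact fA_add (y := y) d f2 x A hpre h2

lemma flag_ne (sq : Bool) : ((cond sq 0 1 : Int) != 1) = sq := by rcases sq <;> decide

lemma valF_base_eq {y x : Int} (sq : Bool) (h : x = y) : valF y x sq = 1 := by
  subst h
  unfold valF
  rw [show 2 * (x - x).toNat + 2 = (2 * (x - x).toNat + 1) + 1 from rfl, fA_succ_def]
  simp

lemma valF_base_gt {y x : Int} (sq : Bool) (h : x > y) : valF y x sq = 0 := by
  unfold valF
  rw [show 2 * (y - x).toNat + 2 = (2 * (y - x).toNat + 1) + 1 from rfl, fA_succ_def]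
  have : ¬ x = y := by omega
  simp [this, h]

lemma mu_lt_own_fuel (y x : Int) (sq : Bool) : muF y x sq < 2 * (y - x).toNat + 2 := by
  unfold muF; rcases sq <;> simp <;> omega

lemma valF_unfold {y x : Int} (hx : 1 ≤ x) (hxy : x < y) (sq : Bool) :
    valF y x sq =
      if sq then valF y (x + 2) true + valF y (x * x) false + valF y (x * 3) true
      else valF y (x + 2) true + valF y (x * 3) true := by
  have hne : ¬ x = y := by omega
  have hgt : ¬ x > y := by omega
  unfold valF
  rw [show 2 * (y - x).toNat + 2 = (2 * (y - x).toNat + 1) + 1 from rfl, fA_succ_def]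
  have hstep : ∀ (c : Int) (b : Bool), (1 ≤ c) → muF y c b < 2 * (y - x).toNat + 1 →
      fA (2 * (y - x).toNat + 1) c y (cond b 0 1) = fA (2 * (y - c).toNat + 2) c y (cond b 0 1) := by
    intro c b hc hlt
    refine fA_fuel_irrelevant _ _ c _ (Or.inr hc) ?_ ?_
    · rw [flag_ne]; exact hlt
    · rw [flag_ne]; exact mu_lt_own_fuel y c b
  have h1 : muF y (x + 2) true < 2 * (y - x).toNat + 1 := by
    have := mu_add2 hx hxy true false; unfold muF at this ⊢; simp at this ⊢; omega
  have h3 : muF y (x * 3) true < 2 * (y - x).toNat + 1 := by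
    have := mu_mul3 hx hxy true false; unfold muF at this ⊢; simp at this ⊢; omega
  have e1 := hstep (x + 2) true (by omega) h1
  have e3 := hstep (x * 3) true (by omega) h3
  rcases sq with _ | _
  · simp only [if_neg hne, if_neg hgt, cond]
    have : ¬ ((1:Int) ≠ 1) := by simp
    rw [if_neg this]
    simp only [cond] at e1 e3
    rw [e1, e3]
    simp
  · simp only [if_neg hne, if_neg hgt, cond]
    have : ((0:Int) ≠ 1) := by decide
    rw [if_pos this]
    have h2 : muF y (x * x) false < 2 * (y - x).toNat + 1 := by
      have := mu_sq hx hxy; unfold muF at this ⊢; simp at this ⊢; omega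
    have e2 := hstep (x * x) false (by nlinarith) h2
    simp only [cond] at e1 e2 e3
    have hx2 : x ^ 2 = x * x := by ring
    rw [hx2, e1, e2, e3]
    simp

lemma goB_main (y : Int) : ∀ (fuel : Nat) (x : Int) (sq : Bool) (memo : PySem.Dict (Int × Bool) Int),
    (y ≤ x ∨ 1 ≤ x) → muF y x sq < fuel → InvF y memo →
    (goB fuel y x sq memo).1 = valF y x sq ∧ InvF y (goB fuel y x sq memo).2 := by
  intro fuel
  induction fuel with
  | zero => intro x sq memo _ h _; exact absurd h (Nat.not_lt_zero _)
  | succ k ih =>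
    intro x sq memo hpre hmu hinv
    by_cases h1 : x = y
    · rw [goB_succ_def, if_pos h1]
      exact ⟨by rw [valF_base_eq sq h1], hinv⟩
    · by_cases h2 : x > y
      · rw [goB_succ_def, if_neg h1, if_pos h2]
        exact ⟨by rw [valF_base_gt sq h2], hinv⟩
      · have hxy : x < y := by omega
        have hx : 1 ≤ x := by rcases hpre with h' | h' <;> omega
        rw [goB_succ_def, if_neg h1, if_neg h2]
        cases hget : memo.get? (x, sq) with
        | some v => exact ⟨hinv x sq v hget, hinv⟩
        | none =>
          obtain ⟨e1, i1⟩ := ih (x + 2) true memo (Or.inr (by omega))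
            (by have := mu_add2 hx hxy true sq; omega) hinv
          obtain ⟨e3, i3⟩ := ih (x * 3) true _ (Or.inr (by omega))
            (by have := mu_mul3 hx hxy true sq; omega) i1
          rcases sq with _ | _
          · -- sq = false
            simp only [Bool.false_eq_true, if_false]
            refine ⟨?_, ?_⟩
            · dsimp only
              rw [e1, e3, valF_unfold hx hxy false]
              simp
            · intro x' sq' v hv
              rw [PySem.Dict.get?_insert] at hv
              by_cases hk : ((x', sq') : Int × Bool) = (x, false)
              · rw [if_pos hk] at hv
                rw [Prod.mk.injEq] at hk
                obtain ⟨hx', hsq'⟩ := hk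
                cases hv
                subst hx'; subst hsq'
                rw [e1, e3, valF_unfold hx hxy false]
                simp
              · rw [if_neg hk] at hv
                exact i3 x' sq' v hv
          · -- sq = true
            obtain ⟨e2, i2⟩ := ih (x * x) false _ (Or.inr (by nlinarith))
              (by have := mu_sq hx hxy; omega) i3
            simp only [eq_self_iff_true, if_true]
            refine ⟨?_, ?_⟩
            · dsimp only
              rw [e1, e2, e3, valF_unfold hx hxy true]
              simp
              ring
            · intro x' sq' v hv
              rw [PySem.Dict.get?_insert] at hv
              by_cases hk : ((x', sq') : Int × Bool) = (x, true)
              · rw [if_pos hk] at hv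
                rw [Prod.mk.injEq] at hk
                obtain ⟨hx', hsq'⟩ := hk
                cases hv
                subst hx'; subst hsq'
                rw [e1, e2, e3, valF_unfold hx hxy true]
                simp
                ring
              · rw [if_neg hk] at hv
                exact i2 x' sq' v hv

lemma InvF_empty (y : Int) : InvF y PySem.Dict.empty := by
  intro x sq v h
  rw [PySem.Dict.get?_empty] at h
  cases h

-- ===== VERDICT (by name: the statement is the Claim_ definition above) =====
theorem f_spec : Claim_equal_f := by
  intro x y A _ hpre
  unfold Spec_f f f_alt
  have hmu : muF y x (A != 1) < 2 * (y - x).toNat + 2 := mu_lt_own_fuel y x _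
  obtain ⟨hval, _⟩ := goB_main y (2 * (y - x).toNat + 2) x (A != 1) PySem.Dict.empty hpre hmu (InvF_empty y)
  rw [hval]
  unfold valF
  exact fA_congr _ x y A (cond (A != 1) 0 1)
    (by rcases hA : (A != 1) with _ | _ <;> simp at hA <;> simp [hA])
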